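-- pv_equiv track=rewrite | github.com/nakasho0901/solar-pv-forecasting-mmk | tools/interpret/plot_input_response_curve.py | get_feature_index
-- ===== SOURCE A (Python) =====
-- from typing import Dict, Any, List, Tuple
--
-- def get_feature_index(feature_names: List[str], target_name: str) -> int:
--     if target_name in feature_names:
--         return feature_names.index(target_name)
--
--     low = [str(x).lower() for x in feature_names]
--     t = target_name.lower()
--     if t in low:
--         return low.index(t)
--
--     for i, name in enumerate(low):
--         if t in name:
--             return i
--
--     raise ValueError(
--         f"Feature '{target_name}' not found.\n"
--         f"Available features ({len(feature_names)}): {feature_names}"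
--     )
-- ===== SOURCE B (Python) =====
-- def get_feature_index(feature_names, target_name):
--     t = target_name.lower()
--     exact_idx = lower_idx = sub_idx = None
--     for i, name in enumerate(feature_names):
--         lname = str(name).lower()
--         if exact_idx is None and name == target_name:
--             exact_idx = i
--         if lower_idx is None and lname == t:
--             lower_idx = i
--         if sub_idx is None and t in lname:
--             sub_idx = i
--     if exact_idx is not None:
--         return exact_idx
--     if lower_idx is not None:
--         return lower_idx
--     if sub_idx is not None:
--         return sub_idx
--     raise ValueError(
--         f"Feature '{target_name}' not found.\n"
--         f"Available features ({len(feature_names)}): {feature_names}"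
--     )
-- ===== Notes on version B (the rewrite author's own statement) =====
-- stated objective: alternative
-- what changed: Replaces A's three priority-ordered passes (exact membership+index, lowered membership+index, substring scan) with a single pass that keeps three first-seen candidate indices and resolves exact>lower>substring precedence after the loop.
import Mathlib
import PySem

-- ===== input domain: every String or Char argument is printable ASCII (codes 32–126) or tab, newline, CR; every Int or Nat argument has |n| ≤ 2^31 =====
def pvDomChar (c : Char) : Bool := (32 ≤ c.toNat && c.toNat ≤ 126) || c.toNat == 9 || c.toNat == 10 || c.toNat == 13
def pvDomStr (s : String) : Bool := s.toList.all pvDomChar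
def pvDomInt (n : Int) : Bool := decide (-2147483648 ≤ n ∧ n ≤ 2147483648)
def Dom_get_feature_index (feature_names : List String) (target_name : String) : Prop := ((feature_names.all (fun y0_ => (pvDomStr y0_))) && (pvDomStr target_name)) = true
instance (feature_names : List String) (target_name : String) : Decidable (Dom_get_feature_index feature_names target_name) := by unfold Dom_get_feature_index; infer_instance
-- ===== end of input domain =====

-- B replaces A's three priority-ordered scans by one pass keeping three first-seen
-- candidate indices (exact / lowercase / substring) and resolving precedence at the end.


-- ===== PORT A =====
-- "for i, name in enumerate(low): if t in name: return i" — first index whose element contains t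
def pvASubLoop (low : List String) (t : String) (i : Nat) : Option Nat :=
  match low with
  | [] => none
  | name :: rest => if PySem.Str.isIn t name then some i else pvASubLoop rest t (i + 1)

def get_feature_index (feature_names : List String) (target_name : String) : Int :=
  match PySem.List.index? feature_names target_name with
  | some i => (i : Int)
  | none =>
    let low := feature_names.map (fun x => PySem.Str.lower x)
    let t := PySem.Str.lower target_name
    match PySem.List.index? low t with
    | some i => (i : Int)
    | none =>
      match pvASubLoop low t 0 with
      | some i => (i : Int)
      -- Python raises ValueError here; excluded by Pre_get_feature_index
      | none => -1

-- ===== PORT B =====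
-- single pass: fill each slot only if still none, resolve exact > lower > substring after
def pvBLoop (fs : List String) (target_name : String) (t : String) (i : Nat)
    (st : Option Nat × Option Nat × Option Nat) : Option Nat × Option Nat × Option Nat :=
  match fs with
  | [] => st
  | name :: rest =>
    let lname := PySem.Str.lower name
    let e := if st.1.isNone && name == target_name then some i else st.1
    let l := if st.2.1.isNone && lname == t then some i else st.2.1
    let s := if st.2.2.isNone && PySem.Str.isIn t lname then some i else st.2.2
    pvBLoop rest target_name t (i + 1) (e, l, s)

def get_feature_index_alt (feature_names : List String) (target_name : String) : Int :=
  let t := PySem.Str.lower target_name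
  match pvBLoop feature_names target_name t 0 (none, none, none) with
  | (some i, _, _) => (i : Int)
  | (none, some i, _) => (i : Int)
  | (none, none, some i) => (i : Int)
  -- Python raises ValueError here; excluded by Pre_get_feature_index
  | (none, none, none) => -1

-- ===== PRECONDITION & SPEC =====
-- Pre_ excludes exactly the inputs where no feature's lowercase form contains the
-- lowercase target: there Python A (and B) raise ValueError.
def Pre_get_feature_index (feature_names : List String) (target_name : String) : Prop :=
  (feature_names.any (fun n => PySem.Str.isIn (PySem.Str.lower target_name) (PySem.Str.lower n))) = true
instance (feature_names : List String) (target_name : String) : Decidable (Pre_get_feature_index feature_names target_name) := by unfold Pre_get_feature_index; infer_instance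

def pvWitness_get_feature_index : List String × String := (["GHI", "Temp"], "temp")

def Spec_get_feature_index (feature_names : List String) (target_name : String) (out : Int) : Prop := out = get_feature_index_alt feature_names target_name
instance (feature_names : List String) (target_name : String) (out : Int) : Decidable (Spec_get_feature_index feature_names target_name out) := by unfold Spec_get_feature_index; infer_instance

-- ===== CLAIM (what is proved, stated in full; the proofs are below) =====
def Claim_equal_get_feature_index : Prop := ∀ (feature_names : List String) (target_name : String), Dom_get_feature_index feature_names target_name → Pre_get_feature_index feature_names target_name → Spec_get_feature_index feature_names target_name (get_feature_index feature_names target_name)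

-- ===== LEMMAS AND PROOFS =====

-- B's loop: each slot, started arbitrary, is "already set, else first match offset by i".
theorem pvBLoop_fst (fs : List String) (tn t : String) :
    ∀ (i : Nat) (e l s : Option Nat),
      (pvBLoop fs tn t i (e, l, s)).1 =
        (e.or ((PySem.List.index? fs tn).map (· + i))) := by
  induction fs with
  | nil => intro i e l s; simp [pvBLoop]
  | cons n rest ih =>
    intro i e l s
    simp only [pvBLoop, ih]
    cases e with
    | some v => simp
    | none =>
      by_cases h : n == tn
      · simp [PySem.List.index?_eq_idxOf?, List.idxOf?_cons, h]
      · have hne : ¬ (n = tn) := by simpa using h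
        simp [PySem.List.index?_eq_idxOf?, List.idxOf?_cons, h, Option.map_map]
        congr 1; funext x; simp; omega

theorem pvBLoop_snd (fs : List String) (tn t : String) :
    ∀ (i : Nat) (e l s : Option Nat),
      (pvBLoop fs tn t i (e, l, s)).2.1 =
        (l.or ((PySem.List.index? (fs.map (fun x => PySem.Str.lower x)) t).map (· + i))) := by
  induction fs with
  | nil => intro i e l s; simp [pvBLoop]
  | cons n rest ih =>
    intro i e l s
    simp only [pvBLoop, ih]
    cases l with
    | some v => simp
    | none =>
      by_cases h : PySem.Str.lower n == t
      · simp [PySem.List.index?_eq_idxOf?, List.idxOf?_cons, h]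
      · simp [PySem.List.index?_eq_idxOf?, List.idxOf?_cons, h, Option.map_map]
        congr 1; funext x; simp; omega

theorem pvBLoop_thd (fs : List String) (tn t : String) :
    ∀ (i : Nat) (e l s : Option Nat),
      (pvBLoop fs tn t i (e, l, s)).2.2 =
        (s.or (pvASubLoop (fs.map (fun x => PySem.Str.lower x)) t i)) := by
  induction fs with
  | nil => intro i e l s; simp [pvBLoop, pvASubLoop]
  | cons n rest ih =>
    intro i e l s
    simp only [pvBLoop, ih]
    cases s with
    | some v => simp [pvASubLoop]
    | none =>
      by_cases h : PySem.Chars.isIn t.toList (PySem.Chars.lower n.toList)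
      · simp [pvASubLoop, h]
      · simp [pvASubLoop, h]

-- ===== VERDICT (by name: the statement is the Claim_ definition above) =====
theorem get_feature_index_spec : Claim_equal_get_feature_index := by
  unfold Claim_equal_get_feature_index
  intro fs tn _ _
  unfold Spec_get_feature_index get_feature_index get_feature_index_alt
  have h1 := pvBLoop_fst fs tn (PySem.Str.lower tn) 0 none none none
  have h2 := pvBLoop_snd fs tn (PySem.Str.lower tn) 0 none none none
  have h3 := pvBLoop_thd fs tn (PySem.Str.lower tn) 0 none none none
  rcases hB : pvBLoop fs tn (PySem.Str.lower tn) 0 (none, none, none) with ⟨e, l, s⟩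
  rw [hB] at h1 h2 h3
  simp only [Option.none_or, Nat.add_zero] at h1 h2 h3
  simp only [hB, h1, h2, h3]
  cases PySem.List.index? fs tn with
  | some i => simp
  | none =>
    simp only [Option.map_none]
    cases PySem.List.index? (fs.map (fun x => PySem.Str.lower x)) (PySem.Str.lower tn) with
    | some j => simp
    | none =>
      simp only [Option.map_none]
      cases pvASubLoop (fs.map (fun x => PySem.Str.lower x)) (PySem.Str.lower tn) 0 with
      | some k => simp
      | none => simp
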